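-- pv_equiv track=rewrite | github.com/adimaman22/Context-Sensitive-Spell-Checker | context_sensitive_spell checker.py | generate_single_edit_variations
-- ===== SOURCE A (Python) =====
-- from collections import Counter, defaultdict
--
-- def generate_single_edit_variations(word):
--     """
--     Generates all possible single-edit variations of a word using a character-by-character approach.
--
--     This function creates four types of edits:
--     1. Deletions: Remove one letter
--     2. Transpositions: Swap two adjacent letters
--     3. Replacements: Change one letter to another
--     4. Insertions: Add a letter
--
--     Args:
--         word (str): The word to edit.
--
--     Returns:
--         set: A set of all possible variations of the word with one edit.
--     """
--     letters = 'abcdefghijklmnopqrstuvwxyz'  # all the letters a-z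
--     word_length = len(word)
--     variations = defaultdict(set)
--
--     # Deletions
--     for i in range(word_length):
--         new_word = word[:i] + word[i + 1:]
--         variations['deletions'].add(new_word)
--
--     # Transpositions
--     for i in range(word_length - 1):
--         new_word = word[:i] + word[i + 1] + word[i] + word[i + 2:]
--         variations['transpositions'].add(new_word)
--
--     # Replacements
--     for i in range(word_length):
--         for c in letters:
--             if c != word[i]:
--                 new_word = word[:i] + c + word[i + 1:]
--                 variations['replacements'].add(new_word)
--
--     # Insertions
--     for i in range(word_length + 1):
--         for c in letters:
--             new_word = word[:i] + c + word[i:]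
--             variations['insertions'].add(new_word)
--
--     # Combine all variations
--     all_variations = set()
--     for variation_type in variations.values():
--         all_variations.update(variation_type)
--
--     return all_variations
-- ===== SOURCE B (Python) =====
-- def generate_single_edit_variations(word):
--     """Recursive formulation: each edit class is a structural recursion on the
--     word (handle the head character, prepend it to the tail's edits); no
--     indices or slicing by position."""
--     letters = 'abcdefghijklmnopqrstuvwxyz'
--
--     def dels(w):
--         if not w:
--             return []
--         return [w[1:]] + [w[0] + d for d in dels(w[1:])]
--
--     def trans(w):
--         if len(w) < 2:
--             return []
--         return [w[1] + w[0] + w[2:]] + [w[0] + t for t in trans(w[1:])]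
--
--     def repls(w):
--         if not w:
--             return []
--         return [c + w[1:] for c in letters if c != w[0]] + [w[0] + r for r in repls(w[1:])]
--
--     def ins(w):
--         if not w:
--             return [c for c in letters]
--         return [c + w for c in letters] + [w[0] + r for r in ins(w[1:])]
--
--     out = set()
--     for group in (dels(word), trans(word), repls(word), ins(word)):
--         out.update(set(group))
--     return out
-- ===== Notes on version B (the rewrite author's own statement) =====
-- stated objective: alternative
-- what changed: B replaces A's index loops over range(len(word)) with repeated slicing by position by a structural recursion on the word: each edit class is a recursive function that produces the head-position edits and prepends the head character to the tail's edits, so no position indices or position slices occur at all; being recursive, it is bounded by Python's recursion limit (words longer than ~1000 characters) and does more string copying on long words.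
import Mathlib
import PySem

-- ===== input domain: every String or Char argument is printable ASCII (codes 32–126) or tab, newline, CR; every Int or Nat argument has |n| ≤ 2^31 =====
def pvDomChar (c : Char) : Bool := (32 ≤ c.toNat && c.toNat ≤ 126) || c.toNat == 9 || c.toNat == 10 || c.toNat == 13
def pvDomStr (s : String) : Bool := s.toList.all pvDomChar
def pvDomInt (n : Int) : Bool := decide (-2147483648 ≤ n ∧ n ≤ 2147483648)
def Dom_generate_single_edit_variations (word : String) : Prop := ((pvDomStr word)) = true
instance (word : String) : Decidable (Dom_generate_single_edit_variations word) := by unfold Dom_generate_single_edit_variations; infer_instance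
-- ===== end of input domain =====

-- B replaces A's index loops and position slicing by a structural recursion on the word (each edit
-- class handles the head character and prepends it to the tail's edits); alternative, not faster, and
-- bounded by Python's recursion limit on very long words.


-- ===== PORT A =====
-- Strings are handled on their character lists (String.ofList at the end); the defaultdict(set) is a
-- PySem.Dict String (PySem.Set (List Char)) updated with Dict.modify, exactly as Python's
-- variations['k'].add(x) behaves.
def generate_single_edit_variations (word : String) : List String :=
  let letters := "abcdefghijklmnopqrstuvwxyz".toList
  let w := word.toList
  let word_length : Int := (w.length : Int)
  let variations : PySem.Dict String (PySem.Set (List Char)) := PySem.Dict.empty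
  -- Deletions
  let variations := (PySem.List.pyRange 0 word_length).foldl (fun d i =>
    d.modify "deletions" PySem.Set.empty (fun s =>
      s.add (PySem.List.slice w none (some i) ++ PySem.List.slice w (some (i + 1)) none))) variations
  -- Transpositions (word[i+1], word[i] are in range on every iteration)
  let variations := (PySem.List.pyRange 0 (word_length - 1)).foldl (fun d i =>
    d.modify "transpositions" PySem.Set.empty (fun s =>
      s.add (PySem.List.slice w none (some i) ++
        [PySem.List.pyGetD w (i + 1) ' ', PySem.List.pyGetD w i ' '] ++
        PySem.List.slice w (some (i + 2)) none))) variations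
  -- Replacements
  let variations := (PySem.List.pyRange 0 word_length).foldl (fun d i =>
    letters.foldl (fun d c =>
      if c ≠ PySem.List.pyGetD w i ' ' then
        d.modify "replacements" PySem.Set.empty (fun s =>
          s.add (PySem.List.slice w none (some i) ++ [c] ++ PySem.List.slice w (some (i + 1)) none))
      else d) d) variations
  -- Insertions
  let variations := (PySem.List.pyRange 0 (word_length + 1)).foldl (fun d i =>
    letters.foldl (fun d c =>
      d.modify "insertions" PySem.Set.empty (fun s =>
        s.add (PySem.List.slice w none (some i) ++ [c] ++ PySem.List.slice w (some i) none))) d) variations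
  -- Combine all variations
  let all_variations := variations.values.foldl (fun acc v => PySem.Set.update acc v) PySem.Set.empty
  all_variations.map String.ofList

-- ===== PORT B =====
-- Source B's helpers: structural recursion on the character list; w[0]/w[1:] become the cons pattern,
-- string concatenation 'w[0] + d' becomes cons.
def pyAltDels : List Char → List (List Char)
  | [] => []
  | c :: w => w :: (pyAltDels w).map (fun d => c :: d)

def pyAltTrans : List Char → List (List Char)
  | a :: b :: w => (b :: a :: w) :: (pyAltTrans (b :: w)).map (fun t => a :: t)
  | _ => []

def pyAltRepls : List Char → List (List Char)
  | [] => []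
  | c :: w => ("abcdefghijklmnopqrstuvwxyz".toList.filter (fun x => x != c)).map (fun x => x :: w)
      ++ (pyAltRepls w).map (fun r => c :: r)

def pyAltIns : List Char → List (List Char)
  | [] => "abcdefghijklmnopqrstuvwxyz".toList.map (fun c => [c])
  | c :: w => "abcdefghijklmnopqrstuvwxyz".toList.map (fun x => x :: c :: w)
      ++ (pyAltIns w).map (fun r => c :: r)

def generate_single_edit_variations_alt (word : String) : List String :=
  let w := word.toList
  let out := [pyAltDels w, pyAltTrans w, pyAltRepls w, pyAltIns w].foldl
    (fun res g => PySem.Set.update res (PySem.Set.ofList g)) PySem.Set.empty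
  out.map String.ofList

-- ===== PRECONDITION & SPEC =====
def Spec_generate_single_edit_variations (word : String) (out : List String) : Prop := out = generate_single_edit_variations_alt word
instance (word : String) (out : List String) : Decidable (Spec_generate_single_edit_variations word out) := by unfold Spec_generate_single_edit_variations; infer_instance

-- ===== CLAIM (what is proved, stated in full; the proofs are below) =====
def Claim_equal_generate_single_edit_variations : Prop := ∀ (word : String), Dom_generate_single_edit_variations word → Spec_generate_single_edit_variations word (generate_single_edit_variations word)

-- ===== LEMMAS AND PROOFS =====
def pvLetters : List Char := "abcdefghijklmnopqrstuvwxyz".toList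
def pvDels (w : List Char) : List (List Char) :=
  (List.range w.length).map (fun k => w.take k ++ w.drop (k+1))
def pvTrans (w : List Char) : List (List Char) :=
  (List.range (w.length - 1)).map (fun k => w.take k ++ [w.getD (k+1) ' ', w.getD k ' '] ++ w.drop (k+2))
def pvRepls (w : List Char) : List (List Char) :=
  (List.range w.length).flatMap (fun k =>
    (pvLetters.filter (fun c => c != w.getD k ' ')).map (fun c => w.take k ++ [c] ++ w.drop (k+1)))
def pvIns (w : List Char) : List (List Char) :=
  (List.range (w.length + 1)).flatMap (fun k => pvLetters.map (fun c => w.take k ++ [c] ++ w.drop k))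

-- B-side: the recursive helpers compute the same per-class lists
lemma pvDels_cons (c : Char) (w : List Char) :
    pvDels (c :: w) = w :: (pvDels w).map (fun d => c :: d) := by
  simp [pvDels, List.range_succ_eq_map, List.map_map, Function.comp]

lemma pvTrans_cons2 (a b : Char) (w : List Char) :
    pvTrans (a :: b :: w) = (b :: a :: w) :: (pvTrans (b :: w)).map (fun t => a :: t) := by
  simp [pvTrans, List.range_succ_eq_map, List.map_map, Function.comp]

lemma pvRepls_cons (c : Char) (w : List Char) :
    pvRepls (c :: w) = (pvLetters.filter (fun x => x != c)).map (fun x => x :: w)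
      ++ (pvRepls w).map (fun r => c :: r) := by
  simp [pvRepls, List.range_succ_eq_map, List.flatMap_cons, List.map_flatMap,
    List.flatMap_map, List.map_map, Function.comp_def]

lemma pvIns_cons (c : Char) (w : List Char) :
    pvIns (c :: w) = pvLetters.map (fun x => x :: c :: w) ++ (pvIns w).map (fun r => c :: r) := by
  simp [pvIns, List.range_succ_eq_map, List.flatMap_cons, List.map_flatMap,
    List.flatMap_map, List.map_map, Function.comp_def]

lemma pyAltDels_eq (w : List Char) : pyAltDels w = pvDels w := by
  induction w with
  | nil => rfl
  | cons c w ih => rw [pyAltDels, pvDels_cons, ih]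

lemma pyAltTrans_eq (w : List Char) : pyAltTrans w = pvTrans w := by
  induction w with
  | nil => rfl
  | cons a w ih =>
    cases w with
    | nil => rfl
    | cons b w => rw [pyAltTrans, pvTrans_cons2, ih]

lemma pyAltRepls_eq (w : List Char) : pyAltRepls w = pvRepls w := by
  induction w with
  | nil => rfl
  | cons c w ih => rw [pyAltRepls, pvRepls_cons, ih]; rfl

lemma pyAltIns_eq (w : List Char) : pyAltIns w = pvIns w := by
  induction w with
  | nil => rfl
  | cons c w ih => rw [pyAltIns, pvIns_cons, ih]; rfl

lemma pvAddUpdate {α : Type} [BEq α] [LawfulBEq α] (s t : PySem.Set α) (x : α) :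
    PySem.Set.update s (PySem.Set.add t x) = PySem.Set.add (PySem.Set.update s t) x := by
  by_cases hx : x ∈ t
  · have h1 : PySem.Set.add t x = t := by
      simp [PySem.Set.add, PySem.Set.contains, hx]
    have h2 : PySem.Set.add (PySem.Set.update s t) x = PySem.Set.update s t := by
      have : x ∈ PySem.Set.update s t := (PySem.Set.mem_update s t x).mpr (Or.inr hx)
      simp [PySem.Set.add, PySem.Set.contains, this]
    rw [h1, h2]
  · have h1 : PySem.Set.add t x = t ++ [x] := by
      simp [PySem.Set.add, PySem.Set.contains, hx]
    rw [h1]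
    show List.foldl PySem.Set.add s (t ++ [x]) = _
    rw [List.foldl_append]
    rfl

lemma pvUpdateFoldl {α : Type} [BEq α] [LawfulBEq α] :
    ∀ (l : List α) (s t : PySem.Set α),
    PySem.Set.update s (l.foldl PySem.Set.add t) = PySem.Set.update (PySem.Set.update s t) l := by
  intro l
  induction l with
  | nil => intro s t; rfl
  | cons x l ih =>
    intro s t
    simp only [List.foldl_cons]
    rw [ih, pvAddUpdate]
    rfl

lemma pvUpdateOfList {α : Type} [BEq α] [LawfulBEq α] (s : PySem.Set α) (l : List α) :
    PySem.Set.update s (PySem.Set.ofList l) = PySem.Set.update s l := by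
  rw [PySem.Set.ofList_eq_foldl, pvUpdateFoldl]
  rfl

lemma pvB_eq (word : String) : generate_single_edit_variations_alt word =
    (PySem.Set.ofList (pvDels word.toList ++ pvTrans word.toList ++ pvRepls word.toList ++ pvIns word.toList)).map String.ofList := by
  unfold generate_single_edit_variations_alt
  rw [PySem.Set.ofList_eq_foldl]
  simp only [List.foldl_cons, List.foldl_nil, pyAltDels_eq, pyAltTrans_eq, pyAltRepls_eq,
    pyAltIns_eq, pvUpdateOfList, List.foldl_append]
  rfl

-- A-side machinery: each dict-of-sets loop is an insert of a folded set, and the final union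
-- is the dedup of the concatenated per-class lists.
lemma pvModifyEqInsert {κ ν : Type} [BEq κ] [LawfulBEq κ] (d : PySem.Dict κ ν) (k : κ) (d0 : ν)
    (f : ν → ν) : d.modify k d0 f = d.insert k (f (d.getD k d0)) := PySem.Dict.ext_iff.mpr rfl

lemma pvFoldlModify {κ ν α : Type} [BEq κ] [LawfulBEq κ] [DecidableEq κ] (k : κ) (d0 : ν)
    (g : α → ν → ν) : ∀ (l : List α) (d : PySem.Dict κ ν),
    l.foldl (fun d x => d.modify k d0 (g x)) d =
      if l.isEmpty then d else d.insert k (l.foldl (fun s x => g x s) (d.getD k d0)) := by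
  intro l
  induction l with
  | nil => intro d; simp
  | cons x l ih =>
    intro d
    cases hres : l.isEmpty with
    | true =>
      have : l = [] := by simpa using hres
      subst this
      simp [pvModifyEqInsert]
    | false =>
      rw [List.foldl_cons, ih, hres]
      simp only [Bool.false_eq_true, if_false, List.isEmpty_cons]
      rw [pvModifyEqInsert, PySem.Dict.getD_insert, PySem.Dict.insert_insert_self]
      simp

lemma pvLettersFilterNe (x : Char) :
    ("abcdefghijklmnopqrstuvwxyz".toList.filter (fun c => c != x)).isEmpty = false := by
  by_cases hx : x = 'a'
  · subst hx; decide
  · have ha : 'a' ∈ "abcdefghijklmnopqrstuvwxyz".toList.filter (fun c => c != x) := by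
      refine List.mem_filter.mpr ⟨by decide, ?_⟩
      simp only [bne_iff_ne, ne_eq]
      exact fun h => hx h.symm
    have hne := List.ne_nil_of_mem ha
    simpa using hne

lemma pvGetDEmpty {κ ν : Type} [BEq κ] (k : κ) (d0 : ν) :
    (PySem.Dict.empty : PySem.Dict κ ν).getD k d0 = d0 := rfl

lemma pvUpdateEmptySnd {α : Type} [BEq α] (s : PySem.Set α) :
    PySem.Set.update s PySem.Set.empty = s := rfl

lemma pvRangeSubOne (n : Nat) :
    PySem.List.pyRange 0 ((n : Int) - 1) = (List.range (n - 1)).map (fun (k : Nat) => (k : Int)) := by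
  cases n with
  | zero => rfl
  | succ m =>
    rw [show ((m + 1 : Nat) : Int) - 1 = ((m : Nat) : Int) by push_cast; ring,
      PySem.List.pyRange_zero_natCast]
    simp

lemma pvFoldlModifyNested {κ ν α β : Type} [BEq κ] [LawfulBEq κ] [DecidableEq κ] (k : κ) (d0 : ν)
    (g : α → β → ν → ν) (inner : α → List β) (hne : ∀ x, (inner x).isEmpty = false)
    (l : List α) (d : PySem.Dict κ ν) :
    l.foldl (fun d x => (inner x).foldl (fun d y => d.modify k d0 (g x y)) d) d =
      if l.isEmpty then d else
        d.insert k (l.foldl (fun s x => (inner x).foldl (fun s y => g x y s) s) (d.getD k d0)) := by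
  have hstep : (fun (d : PySem.Dict κ ν) x => (inner x).foldl (fun d y => d.modify k d0 (g x y)) d) =
      (fun d x => d.modify k d0 (fun s => (inner x).foldl (fun s y => g x y s) s)) := by
    funext d x
    rw [pvFoldlModify, hne x]
    simp only [Bool.false_eq_true, if_false]
    exact (pvModifyEqInsert d k d0 (fun s => (inner x).foldl (fun s y => g x y s) s)).symm
  rw [hstep, pvFoldlModify]

lemma pvUpdateFoldlAdd {α β : Type} [BEq α] [LawfulBEq α] (s : PySem.Set α) (l : List β)
    (f : β → α) (t : PySem.Set α) :
    PySem.Set.update s (l.foldl (fun s x => PySem.Set.add s (f x)) t) =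
      PySem.Set.update (PySem.Set.update s t) (l.map f) := by
  rw [← pvUpdateFoldl]
  congr 1
  rw [List.foldl_map]

lemma pvUpdateFoldlNested {α β γ : Type} [BEq α] [LawfulBEq α] (s : PySem.Set α) (l : List β)
    (inner : β → List γ) (r : β → γ → α) (t : PySem.Set α) :
    PySem.Set.update s (l.foldl (fun s x => (inner x).foldl (fun s y => PySem.Set.add s (r x y)) s) t) =
      PySem.Set.update (PySem.Set.update s t) (l.flatMap (fun x => (inner x).map (r x))) := by
  rw [← pvUpdateFoldl]
  congr 1
  rw [List.foldl_flatMap]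
  have hfun : (fun (s : PySem.Set α) a => ((inner a).map (r a)).foldl PySem.Set.add s) =
      (fun s x => (inner x).foldl (fun s y => PySem.Set.add s (r x y)) s) := by
    funext s x
    rw [List.foldl_map]
  rw [hfun]

lemma pvDelsCast (w : List Char) :
    (List.range w.length).map (fun (k : Nat) =>
      PySem.List.slice w none (some (k : Int)) ++ PySem.List.slice w (some ((k : Int) + 1))) =
    pvDels w := by
  unfold pvDels
  refine List.map_congr_left ?_
  intro k hk
  rw [show ((k : Int) + 1) = ((k + 1 : Nat) : Int) by push_cast; ring]
  simp only [PySem.List.slice_to_natCast, PySem.List.slice_from_natCast]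

lemma pvTransCast (w : List Char) :
    (List.range (w.length - 1)).map (fun (k : Nat) =>
      PySem.List.slice w none (some (k : Int)) ++
        [PySem.List.pyGetD w ((k : Int) + 1) ' ', PySem.List.pyGetD w (k : Int) ' '] ++
        PySem.List.slice w (some ((k : Int) + 2))) =
    pvTrans w := by
  unfold pvTrans
  refine List.map_congr_left ?_
  intro k hk
  rw [show ((k : Int) + 1) = ((k + 1 : Nat) : Int) by push_cast; ring,
    show ((k : Int) + 2) = ((k + 2 : Nat) : Int) by push_cast; ring]
  simp only [PySem.List.slice_to_natCast, PySem.List.slice_from_natCast,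
    PySem.List.pyGetD_natCast]

lemma pvReplsCast (w : List Char) :
    (List.range w.length).flatMap (fun (k : Nat) =>
      ("abcdefghijklmnopqrstuvwxyz".toList.filter (fun c => c != PySem.List.pyGetD w (k : Int) ' ')).map
        (fun c => PySem.List.slice w none (some (k : Int)) ++ [c] ++
          PySem.List.slice w (some ((k : Int) + 1)))) =
    pvRepls w := by
  unfold pvRepls pvLetters
  refine List.flatMap_congr ?_
  intro k hk
  rw [show ((k : Int) + 1) = ((k + 1 : Nat) : Int) by push_cast; ring]
  simp only [PySem.List.slice_to_natCast, PySem.List.slice_from_natCast,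
    PySem.List.pyGetD_natCast]

lemma pvInsCast (w : List Char) :
    (List.range (w.length + 1)).flatMap (fun (k : Nat) =>
      "abcdefghijklmnopqrstuvwxyz".toList.map (fun c =>
        PySem.List.slice w none (some (k : Int)) ++ [c] ++ PySem.List.slice w (some (k : Int)))) =
    pvIns w := by
  unfold pvIns pvLetters
  refine List.flatMap_congr ?_
  intro k hk
  simp only [PySem.List.slice_to_natCast, PySem.List.slice_from_natCast]

lemma pvA_eq (word : String) :
    generate_single_edit_variations word =
    (PySem.Set.ofList (pvDels word.toList ++ pvTrans word.toList ++ pvRepls word.toList ++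
      pvIns word.toList)).map String.ofList := by
  unfold generate_single_edit_variations
  have hc1 : ((word.toList.length : Int) + 1) = ((word.toList.length + 1 : Nat) : Int) := by
    push_cast; ring
  simp only [hc1, pvRangeSubOne, PySem.List.pyRange_zero_natCast, List.foldl_map]
  simp only [← bne_iff_ne]
  simp only [← List.foldl_filter]
  rw [pvFoldlModify, pvFoldlModify]
  rw [pvFoldlModifyNested _ _ _ _ (fun x => pvLettersFilterNe _)]
  rw [pvFoldlModifyNested _ _ _ _ (fun _ => by decide)]
  have hIns : (List.range (word.toList.length + 1)).isEmpty = false := by simp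
  obtain h | h | h :
      word.toList.length = 0 ∨ word.toList.length = 1 ∨ 2 ≤ word.toList.length := by
    omega
  · -- empty word: only insertions happen
    have hDel : (List.range word.toList.length).isEmpty = true := by simp [h]
    have hTra : (List.range (word.toList.length - 1)).isEmpty = true := by simp [h]
    simp only [hIns, hDel, hTra, Bool.false_eq_true, if_false, if_true, pvGetDEmpty]
    simp only [PySem.Dict.values, PySem.Dict.insert, PySem.Dict.contains, PySem.Dict.empty,
      List.any_nil, Bool.false_eq_true, if_false, List.map_cons, List.map_nil,
      List.nil_append, List.foldl_cons, List.foldl_nil]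
    rw [pvUpdateFoldlNested, pvUpdateEmptySnd, pvInsCast]
    have hd : pvDels word.toList = [] := by simp [pvDels, h]
    have ht : pvTrans word.toList = [] := by simp [pvTrans, h]
    have hr : pvRepls word.toList = [] := by simp [pvRepls, h]
    rw [hd, ht, hr]
    simp only [List.nil_append]
    rw [PySem.Set.ofList_eq_foldl]
    rfl
  · have hDel : (List.range word.toList.length).isEmpty = false := by simp [h]
    have hTra : (List.range (word.toList.length - 1)).isEmpty = true := by simp [h]
    simp only [hIns, hDel, hTra, Bool.false_eq_true, if_false, if_true, pvGetDEmpty]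
    simp only [PySem.Dict.getD_insert, String.reduceEq, if_false, pvGetDEmpty]
    simp only [PySem.Dict.values, PySem.Dict.insert, PySem.Dict.contains, PySem.Dict.empty,
      List.cons_append, List.nil_append, List.any_nil, List.any_cons,
      String.reduceBEq, Bool.or_false, Bool.false_eq_true, if_false, List.map_cons,
      List.map_nil, List.foldl_cons, List.foldl_nil]
    rw [pvUpdateFoldlAdd, pvUpdateFoldlNested, pvUpdateFoldlNested]
    simp only [pvUpdateEmptySnd]
    rw [pvDelsCast, pvReplsCast, pvInsCast]
    have ht : pvTrans word.toList = [] := by simp [pvTrans, h]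
    rw [ht]
    rw [PySem.Set.ofList_eq_foldl, List.foldl_append, List.foldl_append, List.foldl_append]
    rfl
  · obtain ⟨m, hm⟩ : ∃ m, word.toList.length = m + 2 := ⟨word.toList.length - 2, by omega⟩
    have hDel : (List.range word.toList.length).isEmpty = false := by simp [hm]
    have hTra : (List.range (word.toList.length - 1)).isEmpty = false := by simp [hm]
    simp only [hIns, hDel, hTra, Bool.false_eq_true, if_false, pvGetDEmpty]
    simp only [PySem.Dict.getD_insert, String.reduceEq, if_false, pvGetDEmpty]
    simp only [PySem.Dict.values, PySem.Dict.insert, PySem.Dict.contains, PySem.Dict.empty,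
      List.cons_append, List.nil_append, List.any_nil, List.any_cons,
      String.reduceBEq, Bool.or_false, Bool.false_eq_true, if_false, List.map_cons,
      List.map_nil, List.foldl_cons, List.foldl_nil]
    rw [pvUpdateFoldlAdd, pvUpdateFoldlAdd, pvUpdateFoldlNested, pvUpdateFoldlNested]
    simp only [pvUpdateEmptySnd]
    rw [pvDelsCast, pvTransCast, pvReplsCast, pvInsCast]
    rw [PySem.Set.ofList_eq_foldl, List.foldl_append, List.foldl_append, List.foldl_append]
    rfl

-- ===== VERDICT (by name: the statement is the Claim_ definition above) =====
theorem generate_single_edit_variations_spec : Claim_equal_generate_single_edit_variations := by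
  intro word _
  unfold Spec_generate_single_edit_variations
  rw [pvA_eq, pvB_eq]
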